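-- pv_equiv track=rewrite | github.com/euhidaman/ResPaperReader | models/research_assistant.py | _get_search_strategies
-- ===== SOURCE A (Python) =====
-- from typing import List, Dict, Any, Optional, Tuple
--
-- def _get_search_strategies(query: str) -> List[str]:
--     """Generate multiple search strategies for better coverage."""
--     strategies = []
--     query_lower = query.lower()
--
--     # Original query
--     strategies.append(query)
--
--     # Technical term expansions
--     if "tinyml" in query_lower:
--         strategies.extend([
--             "tiny machine learning",
--             "edge machine learning",
--             "mobile ML",
--             "embedded AI",
--             "on-device ML",
--             "resource-constrained ML",
--             "efficient neural networks",
--             "model compression",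
--             "quantized neural networks"
--         ])
--
--     if "nlp" in query_lower:
--         strategies.extend([
--             "natural language processing",
--             "language models",
--             "text processing",
--             "computational linguistics"
--         ])
--
--     if "cv" in query_lower or "computer vision" in query_lower:
--         strategies.extend([
--             "image processing",
--             "visual recognition",
--             "deep learning vision",
--             "convolutional neural networks"
--         ])
--
--     # Add keyword variations
--     words = query.split()
--     if len(words) > 1:
--         # Try individual important words
--         for word in words:
--             if len(word) > 3:
--                 strategies.append(word)
--
--     # Remove duplicates while preserving order
--     seen = set()
--     unique_strategies = []
--     for strategy in strategies:
--         if strategy.lower() not in seen: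
--             seen.add(strategy.lower())
--             unique_strategies.append(strategy)
--
--     return unique_strategies[:8]  # Limit to 8 strategies
-- ===== SOURCE B (Python) =====
-- from typing import List
--
-- _TINYML = [
--     "tiny machine learning", "edge machine learning", "mobile ML",
--     "embedded AI", "on-device ML", "resource-constrained ML",
--     "efficient neural networks", "model compression", "quantized neural networks",
-- ]
-- _NLP = [
--     "natural language processing", "language models", "text processing",
--     "computational linguistics",
-- ]
-- _CV = [
--     "image processing", "visual recognition", "deep learning vision",
--     "convolutional neural networks",
-- ]
--
--
-- def _first_unique(items: List[str], seen, k: int) -> List[str]: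
--     """First k items whose lower-casing is new; recursion stops as soon as k hit."""
--     if k == 0 or not items:
--         return []
--     head, rest = items[0], items[1:]
--     key = head.lower()
--     if key in seen:
--         return _first_unique(rest, seen, k)
--     return [head] + _first_unique(rest, seen | {key}, k - 1)
--
--
-- def _get_search_strategies(query: str) -> List[str]:
--     """Generate multiple search strategies for better coverage."""
--     ql = query.lower()
--     words = query.split()
--     candidates = (
--         [query]
--         + (_TINYML if "tinyml" in ql else [])
--         + (_NLP if "nlp" in ql else [])
--         + (_CV if "cv" in ql or "computer vision" in ql else [])
--         + ([w for w in words if len(w) > 3] if len(words) > 1 else [])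
--     )
--     return _first_unique(candidates, set(), 8)
-- ===== Notes on version B (the rewrite author's own statement) =====
-- stated objective: alternative
-- what changed: Builds the candidate list as one pure concatenation expression and replaces A's full dedup pass followed by a [:8] slice with a recursive helper that collects the first 8 case-insensitively unique candidates and terminates early, never scanning past the 8th unique item.
import Mathlib
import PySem

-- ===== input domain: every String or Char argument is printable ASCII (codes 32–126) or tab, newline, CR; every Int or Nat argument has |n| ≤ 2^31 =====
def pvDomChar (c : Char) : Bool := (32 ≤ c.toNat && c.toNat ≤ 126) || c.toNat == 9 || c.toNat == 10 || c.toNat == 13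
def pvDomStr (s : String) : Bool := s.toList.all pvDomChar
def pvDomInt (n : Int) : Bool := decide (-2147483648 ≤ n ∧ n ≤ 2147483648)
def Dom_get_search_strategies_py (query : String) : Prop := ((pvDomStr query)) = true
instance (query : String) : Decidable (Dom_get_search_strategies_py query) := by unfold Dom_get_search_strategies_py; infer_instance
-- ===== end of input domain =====

-- B builds the candidate list as one concatenation expression and replaces A's full
-- dedup pass + [:8] slice by a recursive helper collecting the first 8 case-insensitively
-- unique candidates with early termination; objective: alternative.


-- ===== PORT A =====
def get_search_strategies_py (query : String) : List String :=
  let query_lower := PySem.Str.lower query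
  let strategies : List String := [] ++ [query]
  let strategies := if PySem.Str.isIn "tinyml" query_lower then
      strategies ++ ["tiny machine learning", "edge machine learning", "mobile ML",
        "embedded AI", "on-device ML", "resource-constrained ML",
        "efficient neural networks", "model compression", "quantized neural networks"]
    else strategies
  let strategies := if PySem.Str.isIn "nlp" query_lower then
      strategies ++ ["natural language processing", "language models", "text processing",
        "computational linguistics"]
    else strategies
  let strategies := if PySem.Str.isIn "cv" query_lower || PySem.Str.isIn "computer vision" query_lower then
      strategies ++ ["image processing", "visual recognition", "deep learning vision",
        "convolutional neural networks"]
    else strategies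
  let words := PySem.Str.split₀ query
  let strategies := if (words.length : Int) > 1 then
      words.foldl (fun acc word => if PySem.Str.len word > 3 then acc ++ [word] else acc) strategies
    else strategies
  let st := strategies.foldl
    (fun (st : PySem.Set String × List String) strategy =>
      if PySem.Set.contains st.1 (PySem.Str.lower strategy) then st
      else (PySem.Set.add st.1 (PySem.Str.lower strategy), st.2 ++ [strategy]))
    (PySem.Set.empty, [])
  st.2.take 8

-- ===== PORT B =====
-- recursion on the item list and the remaining count k, stopping as soon as k = 0
def pvFirstUnique : List String → PySem.Set String → Nat → List String
  | _, _, 0 => []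
  | [], _, _ + 1 => []
  | s :: t, seen, k + 1 =>
    let key := PySem.Str.lower s
    if PySem.Set.contains seen key then pvFirstUnique t seen (k + 1)
    else s :: pvFirstUnique t (PySem.Set.union seen (PySem.Set.ofList [key])) k

def get_search_strategies_py_alt (query : String) : List String :=
  let ql := PySem.Str.lower query
  let words := PySem.Str.split₀ query
  let candidates :=
    [query]
    ++ (if PySem.Str.isIn "tinyml" ql then
          ["tiny machine learning", "edge machine learning", "mobile ML",
           "embedded AI", "on-device ML", "resource-constrained ML",
           "efficient neural networks", "model compression", "quantized neural networks"]
        else [])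
    ++ (if PySem.Str.isIn "nlp" ql then
          ["natural language processing", "language models", "text processing",
           "computational linguistics"]
        else [])
    ++ (if PySem.Str.isIn "cv" ql || PySem.Str.isIn "computer vision" ql then
          ["image processing", "visual recognition", "deep learning vision",
           "convolutional neural networks"]
        else [])
    ++ (if (words.length : Int) > 1 then
          words.filter (fun w => PySem.Str.len w > 3)
        else [])
  pvFirstUnique candidates PySem.Set.empty 8

-- ===== PRECONDITION & SPEC =====
def Spec_get_search_strategies_py (query : String) (out : List String) : Prop := out = get_search_strategies_py_alt query
instance (query : String) (out : List String) : Decidable (Spec_get_search_strategies_py query out) := by unfold Spec_get_search_strategies_py; infer_instance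

-- ===== CLAIM (what is proved, stated in full; the proofs are below) =====
def Claim_equal_get_search_strategies_py : Prop := ∀ (query : String), Dom_get_search_strategies_py query → Spec_get_search_strategies_py query (get_search_strategies_py query)

-- ===== LEMMAS AND PROOFS =====

-- Unbounded case-insensitive first-occurrence dedup, used only to relate the two programs.
def pvUniqAll : List String → PySem.Set String → List String
  | [], _ => []
  | s :: t, seen =>
    if PySem.Set.contains seen (PySem.Str.lower s) then pvUniqAll t seen
    else s :: pvUniqAll t (PySem.Set.add seen (PySem.Str.lower s))

theorem dedup_foldl_eq_uniqAll (l : List String) (seen : PySem.Set String) (uniq : List String) :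
    (l.foldl (fun (st : PySem.Set String × List String) strategy =>
        if PySem.Set.contains st.1 (PySem.Str.lower strategy) then st
        else (PySem.Set.add st.1 (PySem.Str.lower strategy), st.2 ++ [strategy]))
      (seen, uniq)).2
    = uniq ++ pvUniqAll l seen := by
  induction l generalizing seen uniq with
  | nil => simp [pvUniqAll]
  | cons s t ih =>
    simp only [List.foldl, pvUniqAll]
    by_cases h : PySem.Set.contains seen (PySem.Str.lower s) = true
    · rw [h]; simp only [if_true, ih]
    · rw [Bool.eq_false_iff.mpr h]
      simp only [Bool.false_eq_true, if_false, ih, List.append_assoc, List.singleton_append]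

theorem firstUnique_eq_take (l : List String) (seen : PySem.Set String) (k : Nat) :
    pvFirstUnique l seen k = (pvUniqAll l seen).take k := by
  induction l generalizing seen k with
  | nil => cases k <;> simp [pvFirstUnique, pvUniqAll]
  | cons s t ih =>
    cases k with
    | zero => simp [pvFirstUnique]
    | succ k =>
      simp only [pvFirstUnique, pvUniqAll]
      by_cases h : PySem.Set.contains seen (PySem.Str.lower s) = true
      · rw [h]; simp only [if_true, ih]
      · rw [Bool.eq_false_iff.mpr h]
        simp [ih, h, PySem.Set.union, PySem.Set.ofList, PySem.Set.update,
          PySem.Set.empty, PySem.Set.add, PySem.Set.contains]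

theorem get_search_strategies_py_eq (query : String) :
    get_search_strategies_py query = get_search_strategies_py_alt query := by
  unfold get_search_strategies_py get_search_strategies_py_alt
  rw [show (fun (acc : List String) word =>
        if PySem.Str.len word > 3 then acc ++ [word] else acc)
      = (fun (acc : List String) word =>
        if (decide (PySem.Str.len word > 3)) = true then acc ++ [id word] else acc) from by
    funext acc w; simp]
  simp only [PySem.List.foldl_append_if (fun w => decide (PySem.Str.len w > 3)) id, List.map_id,
    List.nil_append]
  rw [dedup_foldl_eq_uniqAll, firstUnique_eq_take, List.nil_append]
  congr 1
  split_ifs <;> simp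

-- ===== VERDICT (by name: the statement is the Claim_ definition above) =====
theorem get_search_strategies_py_spec : Claim_equal_get_search_strategies_py := by
  intro query _
  show _ = _
  exact get_search_strategies_py_eq query
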